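-- pv_equiv track=rewrite | github.com/shrutiashok7/ap-final-assignment | q14.py | equivalent
-- ===== SOURCE A (Python) =====
-- def equivalent(str1, str2):
--     def are_rotationally_equivalent(s1, s2):
--         if len(s1) != len(s2):
--             return False
--
--         extended = s1 + s1
--         return s2 in extended
--
--     n1, n2 = len(str1), len(str2)
--     max_length = 0
--     result = ""
--
--     for length in range(min(n1, n2), 0, -1):
--         candidates = []
--
--         for i in range(n1 - length + 1):
--             substr1 = str1[i:i+length]
--
--             for j in range(n2 - length + 1):
--                 substr2 = str2[j:j+length]
--
--                 if are_rotationally_equivalent(substr1, substr2):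
--                     candidates.append(substr1)
--
--         if candidates:
--             candidates.sort()
--             return candidates[0]
--
--     return ""
-- ===== SOURCE B (Python) =====
-- def equivalent(str1, str2):
--     # B: canonicalize rotations (least rotation = min over cyclic shifts), set of
--     # canonical forms of str2's substrings per length, single filtered scan of str1.
--     def canon(s):
--         return min(s[k:] + s[:k] for k in range(len(s)))
--
--     n1, n2 = len(str1), len(str2)
--     for length in range(min(n1, n2), 0, -1):
--         canons2 = {canon(str2[j:j + length]) for j in range(n2 - length + 1)}
--         matches = [str1[i:i + length] for i in range(n1 - length + 1)
--                    if canon(str1[i:i + length]) in canons2]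
--         if matches:
--             return min(matches)
--     return ""
-- ===== Notes on version B (the rewrite author's own statement) =====
-- stated objective: alternative
-- what changed: A tests every substring pair per length with a substring search in s1+s1; B canonicalizes each substring to its least rotation (min over cyclic shifts), builds a set of canonical forms of str2's substrings per length, and does one filtered scan of str1's substrings, returning their minimum - the inner pairwise search loop disappears.
import Mathlib
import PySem

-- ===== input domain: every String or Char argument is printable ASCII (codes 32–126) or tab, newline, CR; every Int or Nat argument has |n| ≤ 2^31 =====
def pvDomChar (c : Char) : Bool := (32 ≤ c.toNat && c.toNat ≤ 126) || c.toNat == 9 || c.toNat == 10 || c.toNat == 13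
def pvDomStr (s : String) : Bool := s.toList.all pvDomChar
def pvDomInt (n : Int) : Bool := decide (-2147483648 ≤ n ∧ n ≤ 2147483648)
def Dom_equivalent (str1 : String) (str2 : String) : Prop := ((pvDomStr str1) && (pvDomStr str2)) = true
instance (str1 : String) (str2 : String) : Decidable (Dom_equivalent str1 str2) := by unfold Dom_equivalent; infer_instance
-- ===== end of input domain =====

-- B replaces A's per-pair rotation test (substring search in s1+s1 over all substring pairs per length)
-- by canonical least-rotation forms: a set of canonical forms of str2's substrings per length and one filtered
-- scan of str1's substrings; objective: alternative (a different algorithm, comparable measured speed).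


-- ===== PORT A =====
-- are_rotationally_equivalent: length check, then 's2 in s1 + s1'
def pvAreRotEquiv (s1 s2 : List Char) : Bool :=
  if s1.length ≠ s2.length then false
  else PySem.Chars.isIn s2 (s1 ++ s1)

-- inner 'for j in range(n2 - length + 1)' loop, appending matching substr1 to candidates
def pvAJLoop (s2 : List Char) (L : Nat) (sub1 : List Char) (acc : List (List Char)) : List (List Char) :=
  (List.range (s2.length - L + 1)).foldl (fun acc2 (j : Nat) =>
    if pvAreRotEquiv sub1 (PySem.List.slice s2 (some (j : Int)) (some ((j : Int) + (L : Int)))) then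
      acc2 ++ [sub1]
    else acc2) acc

-- 'for i in range(n1 - length + 1)' building candidates
def pvACands (s1 s2 : List Char) (L : Nat) : List (List Char) :=
  (List.range (s1.length - L + 1)).foldl (fun acc (i : Nat) =>
    pvAJLoop s2 L (PySem.List.slice s1 (some (i : Int)) (some ((i : Int) + (L : Int)))) acc) []

-- 'for length in range(min(n1, n2), 0, -1)' with the early return; fuel is the current length
def pvALoop (s1 s2 : List Char) : Nat → List Char
  | 0 => []
  | L + 1 =>
    let cands := pvACands s1 s2 (L + 1)
    if cands = [] then pvALoop s1 s2 L
    else (PySem.List.sorted cands (fun x => x) false).headD []   -- candidates.sort(); return candidates[0]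

def equivalent (str1 : String) (str2 : String) : String :=
  String.ofList (pvALoop str1.toList str2.toList (min str1.toList.length str2.toList.length))

-- ===== PORT B =====
-- canon(s) = min(s[k:] + s[:k] for k in range(len(s))); only called on nonempty s
-- (Python's min would raise on s = '', which B never reaches; the 'none' branch is that unreachable case)
def pvCanon (s : List Char) : List Char :=
  match PySem.List.min? ((List.range s.length).map (fun (k : Nat) =>
      PySem.List.slice s (some (k : Int)) none ++ PySem.List.slice s none (some (k : Int)))) (fun x => x) with
  | some m => m
  | none => s

-- canons2 = {canon(str2[j:j+length]) for j in range(n2 - length + 1)}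
def pvBCanons2 (s2 : List Char) (L : Nat) : List (List Char) :=
  PySem.Set.ofList ((List.range (s2.length - L + 1)).map (fun (j : Nat) =>
    pvCanon (PySem.List.slice s2 (some (j : Int)) (some ((j : Int) + (L : Int))))))

-- matches = [str1[i:i+length] for i in range(n1 - length + 1) if canon(...) in canons2]
def pvBMatches (s1 s2 : List Char) (L : Nat) : List (List Char) :=
  ((List.range (s1.length - L + 1)).map (fun (i : Nat) =>
      PySem.List.slice s1 (some (i : Int)) (some ((i : Int) + (L : Int))))).filter
    (fun sub => decide (pvCanon sub ∈ pvBCanons2 s2 L))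

-- same 'for length in range(min(n1, n2), 0, -1)' frame; returns min(matches) when nonempty
def pvBLoop (s1 s2 : List Char) : Nat → List Char
  | 0 => []
  | L + 1 =>
    match PySem.List.min? (pvBMatches s1 s2 (L + 1)) (fun x => x) with
    | some m => m
    | none => pvBLoop s1 s2 L

def equivalent_alt (str1 : String) (str2 : String) : String :=
  String.ofList (pvBLoop str1.toList str2.toList (min str1.toList.length str2.toList.length))

-- ===== PRECONDITION & SPEC =====
def Spec_equivalent (str1 : String) (str2 : String) (out : String) : Prop := out = equivalent_alt str1 str2
instance (str1 : String) (str2 : String) (out : String) : Decidable (Spec_equivalent str1 str2 out) := by unfold Spec_equivalent; infer_instance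

-- ===== CLAIM (what is proved, stated in full; the proofs are below) =====
def Claim_equal_equivalent : Prop := ∀ (str1 : String) (str2 : String), Dom_equivalent str1 str2 → Spec_equivalent str1 str2 (equivalent str1 str2)

-- ===== LEMMAS AND PROOFS =====

-- instance plumbing: the DecidableLT the ports elaborate with is the LinearOrder one
theorem pv_decLT_eq : (fun (a b : List Char) => a.decidableLT b) = (inferInstance : LinearOrder (List Char)).toDecidableLT := by
  funext a b; exact Subsingleton.elim _ _

theorem pv_rotate_cancel (s : List Char) (n : Nat) (h : 0 < s.length) :
    (s.rotate n).rotate (s.length - n % s.length) = s := by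
  rw [List.rotate_rotate]
  have h2 := Nat.div_add_mod n s.length
  have h1 := Nat.mod_lt n h
  have hd : s.length * (n / s.length + 1) = s.length * (n / s.length) + s.length := by ring
  have he : n + (s.length - n % s.length) = s.length * (n / s.length + 1) := by omega
  rw [he, List.rotate_length_mul]

-- infix of s++s of the same length ↔ rotation
theorem pv_infix_iff_rotate (s t : List Char) (hlen : t.length = s.length) (hpos : 0 < s.length) :
    t <:+: s ++ s ↔ ∃ k, t = s.rotate k := by
  constructor
  · rintro ⟨pre, post, hpp⟩
    have hlens := congrArg List.length hpp
    simp only [List.length_append, hlen] at hlens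
    have hk : pre.length ≤ s.length := by omega
    refine ⟨pre.length, ?_⟩
    have h1 : t ++ post = (s ++ s).drop pre.length := by
      rw [← hpp, List.append_assoc, List.drop_left]
    have h2 : t = ((s ++ s).drop pre.length).take t.length := by
      rw [← h1, List.take_left]
    rw [h2, List.drop_append, List.rotate_eq_drop_append_take hk, List.take_append]
    have e0 : pre.length - s.length = 0 := by omega
    rw [e0, List.drop_zero]
    congr 1
    · exact List.take_of_length_le (by simp only [List.length_drop, hlen]; omega)
    · congr 1
      simp only [List.length_drop, hlen]
      omega
  · rintro ⟨k, rfl⟩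
    rw [← List.rotate_mod]
    have hk : k % s.length < s.length := Nat.mod_lt _ hpos
    refine ⟨s.take (k % s.length), s.drop (k % s.length), ?_⟩
    rw [List.rotate_eq_drop_append_take (le_of_lt hk)]
    simp only [List.append_assoc, List.take_append_drop]
    rw [← List.append_assoc, List.take_append_drop]

-- the rotation list inside pvCanon, cleaned up
theorem pv_rotList_eq (s : List Char) :
    (List.range s.length).map (fun (k : Nat) =>
        PySem.List.slice s (some (k : Int)) none ++ PySem.List.slice s none (some (k : Int)))
      = (List.range s.length).map (fun k => s.rotate k) := by
  apply List.map_congr_left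
  intro k hk
  rw [List.mem_range] at hk
  rw [PySem.List.slice_from_natCast, PySem.List.slice_to_natCast,
    List.rotate_eq_drop_append_take (le_of_lt hk)]

theorem pv_mem_rotList (s x : List Char) (h : 0 < s.length) :
    x ∈ (List.range s.length).map (fun k => s.rotate k) ↔ ∃ k, x = s.rotate k := by
  simp only [List.mem_map, List.mem_range]
  constructor
  · rintro ⟨k, _, rfl⟩; exact ⟨k, rfl⟩
  · rintro ⟨k, rfl⟩
    exact ⟨k % s.length, Nat.mod_lt _ h, (List.rotate_mod s k)⟩

theorem pv_canon_mem (s : List Char) (h : 0 < s.length) : ∃ k, pvCanon s = s.rotate k := by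
  unfold pvCanon
  rw [pv_rotList_eq]
  rcases hm : PySem.List.min? ((List.range s.length).map (fun k => s.rotate k)) (fun x => x) with _ | m
  · rw [PySem.List.min?_eq_none_iff] at hm
    simp only [List.map_eq_nil_iff, List.range_eq_nil] at hm
    omega
  · exact (pv_mem_rotList s m h).mp (PySem.List.min?_mem hm)

theorem pv_canon_min (s x : List Char) (h : 0 < s.length) (hx : ∃ k, x = s.rotate k) :
    pvCanon s ≤ x := by
  unfold pvCanon
  rw [pv_rotList_eq]
  rcases hm : PySem.List.min? ((List.range s.length).map (fun k => s.rotate k)) (fun x => x) with _ | m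
  · rw [PySem.List.min?_eq_none_iff] at hm
    simp only [List.map_eq_nil_iff, List.range_eq_nil] at hm
    omega
  · rw [pv_decLT_eq] at hm
    exact PySem.List.min?_isMin hm x ((pv_mem_rotList s x h).mpr hx)

theorem pv_canon_eq_iff (s t : List Char) (L : Nat) (hs : s.length = L) (ht : t.length = L) (hL : 0 < L) :
    (∃ k, t = s.rotate k) ↔ pvCanon s = pvCanon t := by
  have hps : 0 < s.length := by omega
  have hpt : 0 < t.length := by omega
  constructor
  · rintro ⟨k, hk⟩
    have hst : s = t.rotate (s.length - k % s.length) := by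
      rw [hk]; exact (pv_rotate_cancel s k hps).symm
    apply le_antisymm
    · rcases pv_canon_mem t hpt with ⟨b, hb⟩
      apply pv_canon_min s _ hps
      exact ⟨k + b, by rw [hb, hk, List.rotate_rotate]⟩
    · rcases pv_canon_mem s hps with ⟨a, ha⟩
      apply pv_canon_min t _ hpt
      exact ⟨(s.length - k % s.length) + a, by rw [ha, ← List.rotate_rotate, ← hst]⟩
  · intro heq
    rcases pv_canon_mem s hps with ⟨a, ha⟩
    rcases pv_canon_mem t hpt with ⟨b, hb⟩
    have hab : s.rotate a = t.rotate b := by rw [← ha, ← hb, heq]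
    refine ⟨a + (t.length - b % t.length), ?_⟩
    rw [← List.rotate_rotate, hab, pv_rotate_cancel t b hpt]

-- pointwise bridge: A's rotation test ↔ B's canonical-form equality
theorem pv_rotEquiv_iff_canon (s t : List Char) (L : Nat) (hs : s.length = L) (ht : t.length = L) (hL : 0 < L) :
    pvAreRotEquiv s t = true ↔ pvCanon s = pvCanon t := by
  unfold pvAreRotEquiv
  have hlen : t.length = s.length := by omega
  rw [if_neg (by omega)]
  rw [PySem.Chars.isIn_iff_infix, pv_infix_iff_rotate s t hlen (by omega),
    pv_canon_eq_iff s t L hs ht hL]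

-- membership in A's candidates list
theorem pv_mem_ACands (s1 s2 : List Char) (L : Nat) (x : List Char) :
    x ∈ pvACands s1 s2 L ↔ ∃ i < s1.length - L + 1, x = (s1.drop i).take L ∧
      ∃ j < s2.length - L + 1, pvAreRotEquiv ((s1.drop i).take L) ((s2.drop j).take L) = true := by
  unfold pvACands pvAJLoop
  simp only [PySem.List.foldl_append_if, PySem.List.foldl_append_eq_flatMap, List.nil_append,
    List.mem_flatMap, List.mem_map, List.mem_filter, List.mem_range, PySem.List.slice_natCast_add]
  constructor
  · rintro ⟨i, hi, j, ⟨⟨hj, hp⟩, rfl⟩⟩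
    exact ⟨i, hi, rfl, j, hj, hp⟩
  · rintro ⟨i, hi, rfl, j, hj, hp⟩
    exact ⟨i, hi, j, ⟨⟨hj, hp⟩, rfl⟩⟩

-- membership in B's matches list
theorem pv_mem_BMatches (s1 s2 : List Char) (L : Nat) (x : List Char) :
    x ∈ pvBMatches s1 s2 L ↔ ∃ i < s1.length - L + 1, x = (s1.drop i).take L ∧
      ∃ j < s2.length - L + 1, pvCanon ((s1.drop i).take L) = pvCanon ((s2.drop j).take L) := by
  unfold pvBMatches pvBCanons2
  simp only [List.mem_filter, List.mem_map, List.mem_range, PySem.Set.mem_ofList,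
    decide_eq_true_eq, PySem.List.slice_natCast_add]
  constructor
  · rintro ⟨⟨i, hi, rfl⟩, j, hj, hc⟩
    exact ⟨i, hi, rfl, j, hj, hc.symm⟩
  · rintro ⟨i, hi, rfl, j, hj, hc⟩
    exact ⟨⟨i, hi, rfl⟩, j, hj, hc.symm⟩

theorem pv_loop_eq (s1 s2 : List Char) (L : Nat) (h1 : L ≤ s1.length) (h2 : L ≤ s2.length) :
    pvALoop s1 s2 L = pvBLoop s1 s2 L := by
  induction L with
  | zero => rfl
  | succ L ih =>
    have hmem : ∀ x, x ∈ pvACands s1 s2 (L + 1) ↔ x ∈ pvBMatches s1 s2 (L + 1) := by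
      intro x
      rw [pv_mem_ACands, pv_mem_BMatches]
      apply exists_congr; intro i
      apply and_congr_right; intro hi
      apply and_congr_right; intro hx
      apply exists_congr; intro j
      apply and_congr_right; intro hj
      exact pv_rotEquiv_iff_canon _ _ (L + 1)
        (by simp only [List.length_take, List.length_drop]; omega)
        (by simp only [List.length_take, List.length_drop]; omega)
        (by omega)
    simp only [pvALoop, pvBLoop]
    by_cases hc : pvACands s1 s2 (L + 1) = []
    · have hb : pvBMatches s1 s2 (L + 1) = [] := by
        rw [List.eq_nil_iff_forall_not_mem]
        intro a ha
        rw [List.eq_nil_iff_forall_not_mem] at hc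
        exact hc a ((hmem a).mpr ha)
      rw [if_pos hc, hb]
      have hnone : PySem.List.min? ([] : List (List Char)) (fun x => x) = none := rfl
      rw [hnone]
      exact ih (by omega) (by omega)
    · rw [if_neg hc]
      rcases hsort : PySem.List.sorted (pvACands s1 s2 (L + 1)) (fun x => x) false with _ | ⟨m, tl⟩
      · rw [PySem.List.sorted_eq_nil_iff] at hsort
        exact absurd hsort hc
      · rcases hmin : PySem.List.min? (pvBMatches s1 s2 (L + 1)) (fun x => x) with _ | m'
        · rw [PySem.List.min?_eq_none_iff] at hmin
          rcases List.exists_mem_of_ne_nil _ hc with ⟨a, ha⟩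
          have := (hmem a).mp ha
          rw [hmin] at this
          simp at this
        · simp only [List.headD_cons]
          have hm_mem : m ∈ pvACands s1 s2 (L + 1) :=
            (PySem.List.mem_sorted _ _ _ _).mp (hsort ▸ List.mem_cons_self)
          have hm'_mem : m' ∈ pvBMatches s1 s2 (L + 1) := PySem.List.min?_mem hmin
          rw [pv_decLT_eq] at hsort hmin
          have hle : m ≤ m' := PySem.List.key_head_sorted_le _ _ hsort m' ((hmem m').mpr hm'_mem)
          have hge : m' ≤ m := PySem.List.min?_isMin hmin m ((hmem m).mp hm_mem)
          exact le_antisymm hle hge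

-- ===== VERDICT (by name: the statement is the Claim_ definition above) =====
theorem equivalent_spec : Claim_equal_equivalent := by
  intro str1 str2 _
  unfold Spec_equivalent equivalent equivalent_alt
  exact congrArg String.ofList (pv_loop_eq _ _ _ (Nat.min_le_left _ _) (Nat.min_le_right _ _))
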